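-- pv_equiv track=rewrite | github.com/s1td1kov/Basics-in-Python | Week6/Проходной балл.py | konkurs
-- ===== SOURCE A (Python) =====
-- def konkurs(n, k, konk):
--     if n <= k:
--         return 0
--     elif konk[0] == konk[k]:
--         return 1
--     for i in range(k, 0, -1):
--         if konk[i - 1] > konk[i]:
--             return konk[i - 1]
-- ===== SOURCE B (Python) =====
-- def _last_descent(konk, lo, hi):
--     # value konk[i-1] for the largest i in [lo, hi] with konk[i-1] > konk[i], else None
--     if lo > hi:
--         return None
--     if lo == hi:
--         return konk[lo - 1] if konk[lo - 1] > konk[lo] else None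
--     mid = (lo + hi) // 2
--     right = _last_descent(konk, mid + 1, hi)
--     return right if right is not None else _last_descent(konk, lo, mid)
--
--
-- def konkurs(n, k, konk):
--     if n <= k:
--         return 0
--     if konk[0] == konk[k]:
--         return 1
--     return _last_descent(konk, 1, k)
-- ===== Notes on version B (the rewrite author's own statement) =====
-- stated objective: alternative
-- what changed: A does a linear backward scan from k with early return at the first strict descent; B recursively divides the index range [1,k] in half, searching the right half first and the left half only if the right has no descent, returning the value at the last descent.
import Mathlib
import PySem

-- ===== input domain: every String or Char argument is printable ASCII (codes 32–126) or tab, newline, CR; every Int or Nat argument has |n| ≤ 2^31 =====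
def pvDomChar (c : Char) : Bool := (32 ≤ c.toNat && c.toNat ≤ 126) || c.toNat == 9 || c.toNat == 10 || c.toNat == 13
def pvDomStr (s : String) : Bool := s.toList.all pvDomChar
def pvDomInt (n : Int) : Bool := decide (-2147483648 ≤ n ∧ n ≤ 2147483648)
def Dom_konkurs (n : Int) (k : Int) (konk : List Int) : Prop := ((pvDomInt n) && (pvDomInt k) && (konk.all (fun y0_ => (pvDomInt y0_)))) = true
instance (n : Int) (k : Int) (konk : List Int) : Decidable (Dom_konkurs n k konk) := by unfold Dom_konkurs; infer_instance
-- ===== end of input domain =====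

-- B replaces A's linear backward scan (early return at the first strict descent below k)
-- by a divide-and-conquer recursion on the index range [1, k] (right half first); same
-- cost, alternative structure.

-- ===== PORT A =====
-- for i in range(k, 0, -1): if konk[i-1] > konk[i]: return konk[i-1]
-- (every i of the range is a valid index under Pre_, so pyGetD with default 0 is exact there)
def konkursLoopA (konk : List Int) : List Int → Option Int
  | [] => none
  | i :: rest =>
      if PySem.List.pyGetD konk (i - 1) 0 > PySem.List.pyGetD konk i 0 then
        some (PySem.List.pyGetD konk (i - 1) 0)
      else konkursLoopA konk rest

def konkurs (n : Int) (k : Int) (konk : List Int) : Option Int :=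
  if n ≤ k then some 0
  else
    match PySem.List.pyGet? konk 0, PySem.List.pyGet? konk k with
    | some a, some b =>
        if a == b then some 1
        else konkursLoopA konk (PySem.List.pyRange k 0 (-1))
    | _, _ => none  -- IndexError: excluded by Pre_

-- ===== PORT B =====
-- _last_descent(konk, lo, hi): divide and conquer, right half first; the fuel argument
-- only makes the recursion structural (fuel > hi - lo always holds at the call site).
def lastDescentF (konk : List Int) : Nat → Int → Int → Option Int
  | 0, _, _ => none  -- unreachable with sufficient fuel
  | fuel + 1, lo, hi =>
      if lo > hi then none
      else if lo = hi then
        if PySem.List.pyGetD konk (lo - 1) 0 > PySem.List.pyGetD konk lo 0 then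
          some (PySem.List.pyGetD konk (lo - 1) 0)
        else none
      else
        let mid := PySem.Int.floordiv (lo + hi) 2
        match lastDescentF konk fuel (mid + 1) hi with
        | some v => some v
        | none => lastDescentF konk fuel lo mid

def konkurs_alt (n : Int) (k : Int) (konk : List Int) : Option Int :=
  if n ≤ k then some 0
  else
    match PySem.List.pyGet? konk 0 with
    | none => none  -- IndexError: excluded by Pre_
    | some a =>
      match PySem.List.pyGet? konk k with
      | none => none  -- IndexError: excluded by Pre_
      | some b =>
        if a == b then some 1
        else lastDescentF konk (k.toNat + 1) 1 k

-- ===== PRECONDITION & SPEC =====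
-- Pre_ excludes exactly the inputs where Python A raises IndexError: n > k with konk
-- empty or k outside the (Python, possibly negative) index range of konk.
def Pre_konkurs (n : Int) (k : Int) (konk : List Int) : Prop :=
  n ≤ k ∨ (konk ≠ [] ∧ PySem.Raise.InRange konk.length k)
instance (n : Int) (k : Int) (konk : List Int) : Decidable (Pre_konkurs n k konk) := by
  unfold Pre_konkurs; infer_instance

def pvWitness_konkurs : Int × Int × List Int := (4, 2, [10, 9, 9, 8])

def Spec_konkurs (n : Int) (k : Int) (konk : List Int) (out : Option Int) : Prop := out = konkurs_alt n k konk
instance (n : Int) (k : Int) (konk : List Int) (out : Option Int) : Decidable (Spec_konkurs n k konk out) := by unfold Spec_konkurs; infer_instance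

-- ===== CLAIM (what is proved, stated in full; the proofs are below) =====
def Claim_equal_konkurs : Prop := ∀ (n : Int) (k : Int) (konk : List Int), Dom_konkurs n k konk → Pre_konkurs n k konk → Spec_konkurs n k konk (konkurs n k konk)

-- ===== LEMMAS AND PROOFS =====

-- A's scan over a concatenation: first part wins if it finds a descent.
theorem konkursLoopA_append (konk : List Int) (l1 l2 : List Int) :
    konkursLoopA konk (l1 ++ l2) =
      match konkursLoopA konk l1 with
      | some v => some v
      | none => konkursLoopA konk l2 := by
  induction l1 with
  | nil => rfl
  | cons i rest ih =>
      simp only [List.cons_append, konkursLoopA]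
      split_ifs with h
      · rfl
      · exact ih

-- splitting a countdown range at any point
theorem pyRange_neg_one_append (a c b : Int) (h1 : b ≤ c) (h2 : c ≤ a) :
    PySem.List.pyRange a b (-1) =
      PySem.List.pyRange a c (-1) ++ PySem.List.pyRange c b (-1) := by
  rw [PySem.List.pyRange_neg_one_eq_reverse, PySem.List.pyRange_neg_one_eq_reverse,
    PySem.List.pyRange_neg_one_eq_reverse,
    PySem.List.pyRange_one_append (b + 1) (c + 1) (a + 1) (by omega) (by omega),
    List.reverse_append]

-- Key lemma: B's divide-and-conquer over [lo, hi] equals A's backward scan over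
-- range(hi, lo-1, -1), for any sufficient fuel.
theorem lastDescentF_eq_loopA (konk : List Int) :
    ∀ (fuel : Nat) (lo hi : Int), (hi - lo).toNat < fuel →
      lastDescentF konk fuel lo hi =
        konkursLoopA konk (PySem.List.pyRange hi (lo - 1) (-1)) := by
  intro fuel
  induction fuel with
  | zero => intro lo hi h; omega
  | succ fuel ih =>
      intro lo hi h
      by_cases hgt : lo > hi
      · rw [PySem.List.pyRange_neg_one_eq_nil (by omega)]
        simp [lastDescentF, hgt, konkursLoopA]
      · by_cases heq : lo = hi
        · subst heq
          rw [PySem.List.pyRange_neg_one_cons (by omega),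
            PySem.List.pyRange_neg_one_eq_nil (by omega)]
          simp only [lastDescentF, konkursLoopA]
          split_ifs with h1 <;> simp_all
        · -- lo < hi
          have hlt : lo < hi := by omega
          have hmid := PySem.Int.floordiv_two_mid_bounds (lo := lo) (hi := hi) (by omega)
          have hmlt : PySem.Int.floordiv (lo + hi) 2 < hi := by
            have := PySem.Int.floordiv_lt_iff_lt_mul (a := lo + hi) (b := 2) (q := hi) (by omega)
            omega
          set mid := PySem.Int.floordiv (lo + hi) 2 with hmdef
          have hR := ih (mid + 1) hi (by omega)
          rw [show mid + 1 - 1 = mid by ring] at hR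
          rw [pyRange_neg_one_append hi mid (lo - 1) (by omega) (by omega),
            konkursLoopA_append, ← hR, ← ih lo mid (by omega)]
          simp only [lastDescentF]
          rw [if_neg (by omega), if_neg (by omega), ← hmdef]

-- ===== VERDICT (by name: the statement is the Claim_ definition above) =====
theorem konkurs_spec : Claim_equal_konkurs := by
  intro n k konk _ _
  unfold Spec_konkurs konkurs konkurs_alt
  by_cases hnk : n ≤ k
  · simp [hnk]
  · simp only [if_neg hnk]
    cases h0 : PySem.List.pyGet? konk 0 with
    | none => rfl
    | some a =>
      cases hk : PySem.List.pyGet? konk k with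
      | none => rfl
      | some b =>
        by_cases hab : a == b
        · simp [hab]
        · simp only [hab, Bool.false_eq_true, if_false]
          rw [lastDescentF_eq_loopA konk (k.toNat + 1) 1 k (by omega)]
          norm_num
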